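-- pv_equiv track=rewrite | github.com/Tiagosvi/Introduccion-a-la-programacion-I | Parciales Python/Parcial2davuelta.py | acomodar
-- ===== SOURCE A (Python) =====
-- def acomodar (s: list[str]) -> list[str]:
--     i:int = 0
--     res:list[str] = []
--
--     for i in range (len(s)):
--         if s[i] == "UP":
--             res.append(s[i])
--
--     for i in range(len(s)):
--         if s[i] == "LLA":
--             res.append(s[i])
--
--
--     print (res)
--     return res
-- ===== SOURCE B (Python) =====
-- def acomodar(s: list[str]) -> list[str]:
--     # Single pass partitioning into the two groups at once, instead of
--     # A's two separate staged index-loop scans over the whole list.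
--     ups: list[str] = []
--     llas: list[str] = []
--     for x in s:
--         if x == "UP":
--             ups.append(x)
--         elif x == "LLA":
--             llas.append(x)
--     res = ups + llas
--     print(res)
--     return res
-- ===== Notes on version B (the rewrite author's own statement) =====
-- stated objective: simpler
-- what changed: Replaces A's two staged index loops (first scan-and-append all 'UP', then rescan for 'LLA') with one single pass that partitions the elements into an UP accumulator and an LLA accumulator simultaneously and concatenates them at the end.
import Mathlib
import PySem

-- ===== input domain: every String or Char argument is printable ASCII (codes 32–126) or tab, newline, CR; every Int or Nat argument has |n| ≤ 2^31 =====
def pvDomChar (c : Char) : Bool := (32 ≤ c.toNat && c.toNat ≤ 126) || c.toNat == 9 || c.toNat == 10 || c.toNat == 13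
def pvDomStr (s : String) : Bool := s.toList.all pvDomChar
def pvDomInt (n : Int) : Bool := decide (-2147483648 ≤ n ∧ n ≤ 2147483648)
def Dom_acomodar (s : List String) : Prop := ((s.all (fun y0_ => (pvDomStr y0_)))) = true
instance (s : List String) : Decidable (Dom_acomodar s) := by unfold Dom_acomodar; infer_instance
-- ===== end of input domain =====

-- ===== PORT A =====
-- A: two staged index loops over range(len(s)), appending s[i] when it equals "UP" / "LLA".
def acomodar (s : List String) : List String :=
  let res : List String :=
    (List.range s.length).foldl
      (fun res i => if s.getD i "" = "UP" then res ++ [s.getD i ""] else res) []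
  (List.range s.length).foldl
    (fun res i => if s.getD i "" = "LLA" then res ++ [s.getD i ""] else res) res

-- ===== PORT B =====
-- B: one pass partitioning into two accumulators (ups, llas), concatenated at the end.
def acomodar_alt (s : List String) : List String :=
  let p : List String × List String :=
    s.foldl
      (fun acc x =>
        if x = "UP" then (acc.1 ++ [x], acc.2)
        else if x = "LLA" then (acc.1, acc.2 ++ [x])
        else acc)
      ([], [])
  p.1 ++ p.2

-- ===== PRECONDITION & SPEC =====
def Spec_acomodar (s : List String) (out : List String) : Prop := out = acomodar_alt s
instance (s : List String) (out : List String) : Decidable (Spec_acomodar s out) := by unfold Spec_acomodar; infer_instance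

-- ===== CLAIM (what is proved, stated in full; the proofs are below) =====
def Claim_equal_acomodar : Prop := ∀ (s : List String), Dom_acomodar s → Spec_acomodar s (acomodar s)

-- ===== LEMMAS AND PROOFS =====

-- One of A's scan-and-append index passes equals appending the filter of its target.
theorem pv_loop_eq (x : String) :
    ∀ (s r0 : List String),
      (List.range s.length).foldl
        (fun r i => if s.getD i "" = x then r ++ [s.getD i ""] else r) r0
      = r0 ++ s.filter (fun y => y = x) := by
  intro s
  induction s using List.reverseRecOn with
  | nil => intro r0; simp
  | append_singleton t a ih =>
    intro r0
    have hlen : (t ++ [a]).length = t.length + 1 := by simp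
    rw [hlen, List.range_succ, List.foldl_append]
    have hbody :
        (List.range t.length).foldl
          (fun r i => if (t ++ [a]).getD i "" = x then r ++ [(t ++ [a]).getD i ""] else r) r0
        = (List.range t.length).foldl
          (fun r i => if t.getD i "" = x then r ++ [t.getD i ""] else r) r0 := by
      apply PySem.List.foldl_congr_mem
      intro r i hi
      have hi' : i < t.length := by simpa using List.mem_range.mp hi
      have : (t ++ [a]).getD i "" = t.getD i "" := by
        simp [List.getD, List.getElem?_append_left hi']
      rw [this]
    rw [hbody, ih]
    have hga : (t ++ [a]).getD t.length "" = a := by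
      simp [List.getD]
    simp only [List.foldl_cons, List.foldl_nil, hga, List.filter_append]
    by_cases h : a = x
    · simp [h]
    · simp [h]

-- B's one-pass fold computes (filter "UP", filter "LLA"), starting from any accumulators.
theorem pv_fold_eq :
    ∀ (s u0 l0 : List String),
      s.foldl
        (fun (acc : List String × List String) x =>
          if x = "UP" then (acc.1 ++ [x], acc.2)
          else if x = "LLA" then (acc.1, acc.2 ++ [x])
          else acc)
        (u0, l0)
      = (u0 ++ s.filter (fun y => y = "UP"), l0 ++ s.filter (fun y => y = "LLA")) := by
  intro s
  induction s with
  | nil => intro u0 l0; simp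
  | cons a t ih =>
    intro u0 l0
    by_cases h : a = "UP"
    · simp [h, ih]
    · by_cases h2 : a = "LLA"
      · simp [h2, ih]
      · simp [h, h2, ih]

-- ===== VERDICT (by name: the statement is the Claim_ definition above) =====
theorem acomodar_spec : Claim_equal_acomodar := by
  intro s _
  unfold Spec_acomodar acomodar acomodar_alt
  rw [pv_loop_eq "UP", pv_loop_eq "LLA", pv_fold_eq]
  simp
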